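-- pv_equiv track=rewrite | github.com/Junroot/algorithm-study | programmers/72416/김준근.py | solution
-- ===== SOURCE A (Python) =====
-- def solution(sales, links):
--     sales = [0] + sales
--     underlings = [[] for _ in range(len(sales))]
--     for link in links:
--         underlings[link[0]].append(link[1])
--
--     cache = [-1 for _ in range(len(sales))]
--
--     def get_min_cost(leader_index):
--         if cache[leader_index] != -1:
--             return cache[leader_index]
--         if len(underlings[leader_index]) == 0:
--             return 0
--         children_sum = sum(get_min_cost(underling) for underling in underlings[leader_index])
--         result = sales[leader_index] + children_sum
--
--         for underling in underlings[leader_index]: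
--             temp = children_sum - get_min_cost(underling) + sales[underling]
--             for temp_underling in underlings[underling]:
--                 temp += get_min_cost(temp_underling)
--             result = min(temp, result)
--         cache[leader_index] = result
--         return result
--
--     return get_min_cost(1)
-- ===== SOURCE B (Python) =====
-- def solution(sales, links):
--     sales = [0] + sales
--     children = [[] for _ in range(len(sales))]
--     for link in links:
--         children[link[0]].append(link[1])
--
--     def dfs(u):
--         # returns (part, best): part = cost if u participates (children free to take best),
--         # best = min cost for u's subtree with the coverage constraint; leaf best is 0.
--         best_sum = 0
--         force = None  # min over children of (part(c) - best(c))
--         for c in children[u]: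
--             cp, cb = dfs(c)
--             best_sum += cb
--             d = cp - cb
--             if force is None or d < force:
--                 force = d
--         part = sales[u] + best_sum
--         best = 0 if force is None else min(part, best_sum + force)
--         return part, best
--
--     return dfs(1)[1]
-- ===== Notes on version B (the rewrite author's own statement) =====
-- stated objective: simpler
-- what changed: Replaces the memoised top-down recursion with -1-sentinel cache and an inner loop that re-walks each child's own children with a single post-order pass returning a (participate-cost, best-cost) pair per node, carrying the forced-child penalty part(c)-best(c) up from each child.
import Mathlib
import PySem

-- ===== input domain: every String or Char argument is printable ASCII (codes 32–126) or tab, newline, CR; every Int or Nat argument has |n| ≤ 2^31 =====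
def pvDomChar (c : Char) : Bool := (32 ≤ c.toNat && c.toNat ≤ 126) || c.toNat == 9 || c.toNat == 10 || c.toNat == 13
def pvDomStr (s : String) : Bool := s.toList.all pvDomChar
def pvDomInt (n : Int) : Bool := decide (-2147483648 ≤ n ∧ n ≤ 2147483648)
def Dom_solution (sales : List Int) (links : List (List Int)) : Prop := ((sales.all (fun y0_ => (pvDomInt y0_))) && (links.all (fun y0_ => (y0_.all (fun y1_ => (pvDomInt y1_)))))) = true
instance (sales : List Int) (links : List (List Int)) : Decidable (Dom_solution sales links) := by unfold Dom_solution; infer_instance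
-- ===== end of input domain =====

-- B changes the decomposition: one post-order pass returning (participate-cost, best-cost) pairs, no
-- memo cache and no inner walk over grandchildren; same asymptotic cost.

-- ===== PORT A =====
-- underlings[link[0]].append(link[1])  (both Pythons build this table the same way)
def pvBuild (n : Nat) (links : List (List Int)) : List (List Int) :=
  links.foldl
    (fun u link =>
      let a := PySem.List.pyGetD link 0 0
      let b := PySem.List.pyGetD link 1 0
      PySem.List.pySetD u a (PySem.List.pyGetD u a [] ++ [b]))
    (List.replicate n [])

-- get_min_cost with the mutable cache threaded through (fuel = len(sales)+2, enough under Pre_)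
def pvGetA (sl : List Int) (und : List (List Int)) : Nat → List Int → Int → Int × List Int
  | 0, cache, _ => (0, cache)
  | fuel+1, cache, i =>
    let cv := PySem.List.pyGetD cache i (-1)
    if cv ≠ -1 then (cv, cache)
    else
      let cs := PySem.List.pyGetD und i []
      if cs.length = 0 then (0, cache)
      else
        let p1 := cs.foldl (fun (p : Int × List Int) c =>
            let r := pvGetA sl und fuel p.2 c
            (p.1 + r.1, r.2)) (0, cache)
        let csum := p1.1
        let result0 := PySem.List.pyGetD sl i 0 + csum
        let p2 := cs.foldl (fun (p : Int × List Int) c =>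
            let rc := pvGetA sl und fuel p.2 c
            let temp0 := csum - rc.1 + PySem.List.pyGetD sl c 0
            let gcs := PySem.List.pyGetD und c []
            let q := gcs.foldl (fun (q : Int × List Int) g =>
                let rg := pvGetA sl und fuel q.2 g
                (q.1 + rg.1, rg.2)) (temp0, rc.2)
            (min q.1 p.1, q.2)) (result0, p1.2)
        (p2.1, PySem.List.pySetD p2.2 i p2.1)

def solution (sales : List Int) (links : List (List Int)) : Int :=
  let sl := (0 : Int) :: sales
  let und := pvBuild sl.length links
  let cache := List.replicate sl.length (-1 : Int)
  (pvGetA sl und (sl.length + 1) cache 1).1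

-- ===== PORT B =====
-- dfs u returns (part, best): part = cost if u participates, best = min cost for u's subtree
def pvGoB (sl : List Int) (ch : List (List Int)) : Nat → Int → Int × Int
  | 0, _ => (0, 0)
  | fuel+1, u =>
    let cs := PySem.List.pyGetD ch u []
    let p := cs.foldl (fun (p : Int × Option Int) c =>
        let r := pvGoB sl ch fuel c
        let d := r.1 - r.2
        (p.1 + r.2,
         match p.2 with
         | none => some d
         | some f => some (if d < f then d else f))) (0, (none : Option Int))
    let part := PySem.List.pyGetD sl u 0 + p.1
    let best := match p.2 with
      | none => 0
      | some f => min part (p.1 + f)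
    (part, best)

def solution_alt (sales : List Int) (links : List (List Int)) : Int :=
  let sl := (0 : Int) :: sales
  let ch := pvBuild sl.length links
  (pvGoB sl ch (sl.length + 1) 1).2

-- ===== PRECONDITION & SPEC =====
-- Python index normalisation: the slot of list index i in a list of length n (Python wraparound)
def pvNorm (n : Nat) (i : Int) : Nat := if 0 ≤ i then i.toNat else n - (-i).toNat
-- the raw child values attached to slot u by the links (in link order)
def pvKidsOf (links : List (List Int)) (N : Nat) (u : Nat) : List Int :=
  (links.filter (fun l => decide (pvNorm N (PySem.List.pyGetD l 0 0) = u))).map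
    (fun l => PySem.List.pyGetD l 1 0)
-- BFS layers from node 1: slots reachable by a walk of exactly t edges
def pvLayer (links : List (List Int)) (N : Nat) : Nat → Finset Nat
  | 0 => {1}
  | t+1 => (pvLayer links N t).biUnion
      (fun u => ((pvKidsOf links N u).map (fun c => pvNorm N c)).toFinset)
-- slots reachable from node 1
def pvReach (links : List (List Int)) (N : Nat) : Finset Nat :=
  (Finset.range N).biUnion (pvLayer links N)

-- Pre_ holds exactly where the Python A returns a value: it excludes only inputs where A raises
-- (IndexError: a link shorter than 2, a link[0] outside the table, a reachable node with an
-- out-of-range child) or never returns (a cycle reachable from node 1 — with N nodes an acyclic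
-- reachable part has no walk of N edges from node 1, so the N-th BFS layer is empty).
def Pre_solution (sales : List Int) (links : List (List Int)) : Prop :=
  sales ≠ [] ∧
  (∀ l ∈ links, 2 ≤ l.length ∧
    PySem.Raise.InRange (sales.length + 1) (PySem.List.pyGetD l 0 0)) ∧
  (∀ u ∈ pvReach links (sales.length + 1),
    ∀ c ∈ pvKidsOf links (sales.length + 1) u,
      PySem.Raise.InRange (sales.length + 1) c) ∧
  pvLayer links (sales.length + 1) (sales.length + 1) = ∅
instance (sales : List Int) (links : List (List Int)) : Decidable (Pre_solution sales links) := by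
  unfold Pre_solution; infer_instance

-- a tree with parent 3 > child 2 and a negative (wrapped) parent index: -4 is slot 2 here
def pvWitness_solution : List Int × List (List Int) :=
  ([14, 10, 14, 13, 12], [[1, 3], [3, 2], [2, 5], [-4, 4]])

def Spec_solution (sales : List Int) (links : List (List Int)) (out : Int) : Prop := out = solution_alt sales links
instance (sales : List Int) (links : List (List Int)) (out : Int) : Decidable (Spec_solution sales links out) := by unfold Spec_solution; infer_instance

-- ===== CLAIM (what is proved, stated in full; the proofs are below) =====
def Claim_equal_solution : Prop := ∀ (sales : List Int) (links : List (List Int)), Dom_solution sales links → Pre_solution sales links → Spec_solution sales links (solution sales links)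

-- ===== LEMMAS AND PROOFS =====

-- proof-only abbreviations
def pvChAt (und : List (List Int)) (i : Int) : List Int := PySem.List.pyGetD und i []
def pvSAt (sl : List Int) (i : Int) : Int := PySem.List.pyGetD sl i 0
def pvBest (sl : List Int) (und : List (List Int)) (N : Nat) (i : Int) : Int := (pvGoB sl und (N+1) i).2
def pvPart (sl : List Int) (und : List (List Int)) (N : Nat) (i : Int) : Int := (pvGoB sl und (N+1) i).1
def pvS (sl : List Int) (und : List (List Int)) (N : Nat) (cs : List Int) : Int :=
  (cs.map (fun c => (pvGoB sl und (N+1) c).2)).sum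
def pvD (sl : List Int) (und : List (List Int)) (N : Nat) (c : Int) : Int :=
  pvPart sl und N c - pvBest sl und N c
def pvDMin (sl : List Int) (und : List (List Int)) (N : Nat) (x : Int) (cs : List Int) : Int :=
  cs.foldl (fun f c => min (pvD sl und N c) f) x
-- context: table length, a bounded rank that strictly drops along edges inside a reach set R
def pvCtx (und : List (List Int)) (N : Nat) (R : Finset Nat) (rk : Nat → Nat) : Prop :=
  und.length = N ∧ (∀ u, rk u ≤ N) ∧
  ∀ u : Nat, u ∈ R → ∀ c ∈ und.getD u [],
    PySem.Raise.InRange N c ∧ pvNorm N c ∈ R ∧ rk (pvNorm N c) < rk u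
-- A's cache invariant: every non-(-1) entry already holds B's best value for its slot
def pvInv (sl : List Int) (und : List (List Int)) (N : Nat) (cache : List Int) : Prop :=
  cache.length = N ∧ ∀ j : Nat, j < N →
    cache.getD j (-1) = -1 ∨ cache.getD j (-1) = pvBest sl und N ((j : Nat) : Int)

lemma pvIdx_of_inRange (n : Nat) (i : Int) (h : PySem.Raise.InRange n i) :
    PySem.List.pyIdx? n i = some (pvNorm n i) := by
  obtain ⟨h1, h2⟩ := h
  unfold PySem.List.pyIdx? pvNorm
  split_ifs <;> first | rfl | omega

lemma pvNorm_lt (n : Nat) (i : Int) (h : PySem.Raise.InRange n i) : pvNorm n i < n := by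
  obtain ⟨h1, h2⟩ := h
  unfold pvNorm
  split_ifs <;> omega

lemma pvNorm_natCast (n u : Nat) (h : u < n) : pvNorm n (u : Int) = u := by
  unfold pvNorm
  split_ifs <;> omega

lemma pvGetD_norm {α : Type} (xs : List α) (i : Int) (d : α)
    (h : PySem.Raise.InRange xs.length i) :
    PySem.List.pyGetD xs i d = xs.getD (pvNorm xs.length i) d := by
  simp [PySem.List.pyGetD, PySem.List.pyGet?, pvIdx_of_inRange xs.length i h,
    List.getD_eq_getElem?_getD]

lemma pvSetD_norm {α : Type} (xs : List α) (i : Int) (v : α)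
    (h : PySem.Raise.InRange xs.length i) :
    PySem.List.pySetD xs i v = xs.set (pvNorm xs.length i) v := by
  simp [PySem.List.pySetD, PySem.List.pySet?, pvIdx_of_inRange xs.length i h]

lemma pvSet_getD {α : Type} (u : List α) (k : Nat) (v : α) (j : Nat) (d : α) (hk : k < u.length) :
    (u.set k v).getD j d = if j = k then v else u.getD j d := by
  rcases eq_or_ne j k with h | h
  · subst h; simp [List.getD_eq_getElem?_getD, hk]
  · simp [List.getD_eq_getElem?_getD, h, Ne.symm h]

lemma pvBuild_length (n : Nat) (links : List (List Int)) : (pvBuild n links).length = n := by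
  unfold pvBuild
  have key : ∀ (ls : List (List Int)) (u : List (List Int)),
      (ls.foldl (fun u link =>
        let a := PySem.List.pyGetD link 0 0
        let b := PySem.List.pyGetD link 1 0
        PySem.List.pySetD u a (PySem.List.pyGetD u a [] ++ [b])) u).length = u.length := by
    intro ls
    induction ls with
    | nil => intro u; rfl
    | cons l rest IH =>
      intro u
      simp only [List.foldl_cons]
      rw [IH]
      exact PySem.List.length_pySetD u _ _
  rw [key]
  simp

-- the built table at slot j holds exactly the kids of j, in link order
lemma pvBuild_getD (links : List (List Int)) (N : Nat)
    (hlk : ∀ l ∈ links, PySem.Raise.InRange N (PySem.List.pyGetD l 0 0)) (j : Nat) :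
    (pvBuild N links).getD j [] = pvKidsOf links N j := by
  unfold pvBuild
  have key : ∀ (ls : List (List Int)),
      (∀ l ∈ ls, PySem.Raise.InRange N (PySem.List.pyGetD l 0 0)) →
      ∀ (u : List (List Int)), u.length = N → ∀ j : Nat,
      (ls.foldl (fun u link =>
        let a := PySem.List.pyGetD link 0 0
        let b := PySem.List.pyGetD link 1 0
        PySem.List.pySetD u a (PySem.List.pyGetD u a [] ++ [b])) u).getD j []
        = u.getD j [] ++ pvKidsOf ls N j := by
    intro ls
    induction ls with
    | nil => intro _ u hu j; simp [pvKidsOf]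
    | cons l rest IH =>
      intro hls u hu j
      have ha := hls l (by simp)
      set a := PySem.List.pyGetD l 0 0 with hadef
      have hk : pvNorm N a < N := pvNorm_lt N a ha
      have ha' : PySem.Raise.InRange u.length a := by rw [hu]; exact ha
      simp only [List.foldl_cons]
      rw [pvGetD_norm u a [] ha', pvSetD_norm u a _ ha', hu]
      rw [IH (fun x hx => hls x (by simp [hx])) _ (by simp [hu]) j]
      have hKcons : pvKidsOf (l :: rest) N j
          = (if pvNorm N a = j then [PySem.List.pyGetD l 1 0] else []) ++ pvKidsOf rest N j := by
        unfold pvKidsOf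
        rw [List.filter_cons]
        by_cases hja : pvNorm N a = j
        · simp [← hadef, hja]
        · simp [← hadef, hja]
      rw [hKcons, pvSet_getD u (pvNorm N a) _ j [] (by omega)]
      by_cases hja : j = pvNorm N a
      · rw [if_pos hja, if_pos hja.symm, hja]
        simp
      · rw [if_neg hja, if_neg (Ne.symm hja)]
        simp
  rw [key links hlk _ (by simp) j]
  have hrep : (List.replicate N ([] : List Int)).getD j [] = [] := by
    simp only [List.getD_eq_getElem?_getD, List.getElem?_replicate]
    split <;> rfl
  rw [hrep]
  simp

-- one BFS step
lemma pvLayer_step (links : List (List Int)) (N t : Nat) (u : Nat)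
    (hu : u ∈ pvLayer links N t) (c : Int) (hc : c ∈ pvKidsOf links N u) :
    pvNorm N c ∈ pvLayer links N (t+1) := by
  simp only [pvLayer, Finset.mem_biUnion, List.mem_toFinset, List.mem_map]
  exact ⟨u, hu, c, hc, rfl⟩

lemma pvLayer_empty_of_ge (links : List (List Int)) (N : Nat)
    (hE : pvLayer links N N = ∅) : ∀ t, N ≤ t → pvLayer links N t = ∅ := by
  intro t
  induction t with
  | zero => intro h; rw [Nat.le_zero] at h; rw [← h]; exact hE
  | succ t IH =>
    intro h
    rcases Nat.lt_or_ge N (t+1) with h' | h'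
    · have := IH (by omega)
      simp only [pvLayer, this, Finset.biUnion_empty]
    · have : N = t + 1 := by omega
      rw [← this]; exact hE

lemma pvMem_layer_lt (links : List (List Int)) (N t : Nat) (u : Nat)
    (hE : pvLayer links N N = ∅) (hu : u ∈ pvLayer links N t) : t < N := by
  by_contra h
  rw [pvLayer_empty_of_ge links N hE t (by omega)] at hu
  simp at hu

-- depth: the largest t < N with u in layer t
def pvDm (links : List (List Int)) (N : Nat) (u : Nat) : Nat :=
  ((Finset.range N).filter (fun t => u ∈ pvLayer links N t)).sup id

lemma pvDm_ge (links : List (List Int)) (N t : Nat) (u : Nat)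
    (ht : t < N) (hu : u ∈ pvLayer links N t) : t ≤ pvDm links N u :=
  Finset.le_sup (f := id) (Finset.mem_filter.2 ⟨Finset.mem_range.2 ht, hu⟩)

lemma pvDm_attained (links : List (List Int)) (N : Nat) (u : Nat)
    (hu : u ∈ pvReach links N) : u ∈ pvLayer links N (pvDm links N u) := by
  obtain ⟨t, ht, hmem⟩ := Finset.mem_biUnion.1 hu
  have hne : ((Finset.range N).filter (fun t => u ∈ pvLayer links N t)).Nonempty :=
    ⟨t, Finset.mem_filter.2 ⟨ht, hmem⟩⟩
  obtain ⟨b, hb, hsup⟩ := Finset.exists_mem_eq_sup _ hne id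
  have hb' := Finset.mem_filter.1 hb
  rw [pvDm, hsup]
  exact hb'.2

lemma pvDm_lt (links : List (List Int)) (N : Nat) (u : Nat)
    (hE : pvLayer links N N = ∅) (hu : u ∈ pvReach links N) : pvDm links N u < N :=
  pvMem_layer_lt links N _ u hE (pvDm_attained links N u hu)

-- an edge pushes the depth strictly up and stays inside reach
lemma pvEdge_step (links : List (List Int)) (N : Nat) (u : Nat) (c : Int)
    (hE : pvLayer links N N = ∅) (hu : u ∈ pvReach links N)
    (hc : c ∈ pvKidsOf links N u) :
    pvNorm N c ∈ pvReach links N ∧ pvDm links N u < pvDm links N (pvNorm N c) := by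
  have hl := pvLayer_step links N (pvDm links N u) u (pvDm_attained links N u hu) c hc
  have hlt : pvDm links N u + 1 < N := pvMem_layer_lt links N _ _ hE hl
  have hmem : pvNorm N c ∈ pvReach links N :=
    Finset.mem_biUnion.2 ⟨pvDm links N u + 1, Finset.mem_range.2 hlt, hl⟩
  have := pvDm_ge links N (pvDm links N u + 1) (pvNorm N c) hlt hl
  exact ⟨hmem, by omega⟩

-- pvGoB only looks at the slot of its argument
lemma goB_normIdx (sl : List Int) (und : List (List Int)) (N : Nat)
    (hsl : sl.length = N) (hund : und.length = N) (f : Nat) (i : Int)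
    (h : PySem.Raise.InRange N i) :
    pvGoB sl und (f+1) i = pvGoB sl und (f+1) ((pvNorm N i : Nat) : Int) := by
  have hlt := pvNorm_lt N i h
  have h2 : PySem.Raise.InRange N ((pvNorm N i : Nat) : Int) := by
    constructor <;> [omega; exact_mod_cast hlt]
  simp only [pvGoB]
  rw [pvGetD_norm und i [] (hund ▸ h), pvGetD_norm und _ [] (hund ▸ h2),
    pvGetD_norm sl i 0 (hsl ▸ h), pvGetD_norm sl _ 0 (hsl ▸ h2),
    hsl, hund, pvNorm_natCast N _ hlt]

-- pvGoB is fuel-stable above the rank of its node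
lemma goB_succ (sl : List Int) (und : List (List Int)) (N : Nat) (R : Finset Nat)
    (rk : Nat → Nat) (hc : pvCtx und N R rk) :
    ∀ f : Nat, ∀ i : Int, PySem.Raise.InRange N i → pvNorm N i ∈ R →
      rk (pvNorm N i) < f → pvGoB sl und (f + 1) i = pvGoB sl und f i := by
  intro f
  induction f with
  | zero => intro i h0 h1 h2; omega
  | succ f IH =>
    intro i h0 h1 h2
    conv_lhs => rw [pvGoB]
    conv_rhs => rw [pvGoB]
    have hk : PySem.List.pyGetD und i [] = und.getD (pvNorm N i) [] := by
      rw [pvGetD_norm und i [] (hc.1 ▸ h0), hc.1]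
    have hfold := PySem.List.foldl_congr_mem (PySem.List.pyGetD und i [])
      (fun (p : Int × Option Int) c =>
        let r := pvGoB sl und (f + 1) c
        let d := r.1 - r.2
        (p.1 + r.2, match p.2 with
          | none => some d
          | some fo => some (if d < fo then d else fo)))
      (fun (p : Int × Option Int) c =>
        let r := pvGoB sl und f c
        let d := r.1 - r.2
        (p.1 + r.2, match p.2 with
          | none => some d
          | some fo => some (if d < fo then d else fo)))
      (0, (none : Option Int))
      (by
        intro acc c hcmem
        rw [hk] at hcmem
        obtain ⟨hir, hmem, hlt⟩ := hc.2.2 (pvNorm N i) h1 c hcmem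
        simp only [IH c hir hmem (by omega)])
    rw [hfold]

lemma goB_stable (sl : List Int) (und : List (List Int)) (N : Nat) (R : Finset Nat)
    (rk : Nat → Nat) (hc : pvCtx und N R rk)
    (f : Nat) (i : Int) (h0 : PySem.Raise.InRange N i) (h1 : pvNorm N i ∈ R)
    (hf : rk (pvNorm N i) < f) :
    pvGoB sl und f i = pvGoB sl und (N + 1) i := by
  have key : ∀ g : Nat, rk (pvNorm N i) < g →
      pvGoB sl und g i = pvGoB sl und (rk (pvNorm N i) + 1) i := by
    intro g hg
    induction g with
    | zero => omega
    | succ g IHg =>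
      rcases Nat.lt_or_ge (rk (pvNorm N i)) g with h | h
      · rw [goB_succ sl und N R rk hc g i h0 h1 h, IHg h]
      · have : rk (pvNorm N i) + 1 = g + 1 := by omega
        rw [this]
  rw [key f hf, ← key (N + 1) (by have := hc.2.1 (pvNorm N i); omega)]

-- B's child fold, first component: running sum of the children's best
lemma bFoldFst (F : Int → Int × Int) :
    ∀ (cs : List Int) (s : Int) (fo : Option Int),
      (cs.foldl (fun (p : Int × Option Int) c =>
          let r := F c
          let d := r.1 - r.2
          (p.1 + r.2, match p.2 with
            | none => some d
            | some f => some (if d < f then d else f))) (s, fo)).1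
        = s + (cs.map (fun c => (F c).2)).sum := by
  intro cs
  induction cs with
  | nil => intro s fo; simp
  | cons c rest IH =>
    intro s fo
    simp only [List.foldl_cons, List.map_cons, List.sum_cons]
    rw [IH]
    ring

-- B's child fold, second component: running minimum of part - best
lemma bFoldSnd (F : Int → Int × Int) :
    ∀ (cs : List Int) (s f0 : Int),
      (cs.foldl (fun (p : Int × Option Int) c =>
          let r := F c
          let d := r.1 - r.2
          (p.1 + r.2, match p.2 with
            | none => some d
            | some f => some (if d < f then d else f))) (s, some f0)).2
        = some (cs.foldl (fun f c => min ((F c).1 - (F c).2) f) f0) := by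
  intro cs
  induction cs with
  | nil => intro s f0; rfl
  | cons c rest IH =>
    intro s f0
    simp only [List.foldl_cons]
    rw [IH]
    have hmm : (if (F c).1 - (F c).2 < f0 then (F c).1 - (F c).2 else f0)
        = min ((F c).1 - (F c).2) f0 := by
      rw [min_def]; split_ifs <;> omega
    rw [hmm]

-- closed characterisation of pvGoB at full fuel
lemma goB_char (sl : List Int) (und : List (List Int)) (N : Nat) (R : Finset Nat)
    (rk : Nat → Nat) (hc : pvCtx und N R rk)
    (i : Int) (h0 : PySem.Raise.InRange N i) (h1 : pvNorm N i ∈ R) :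
    pvGoB sl und (N+1) i = (pvSAt sl i + pvS sl und N (pvChAt und i),
      match pvChAt und i with
      | [] => 0
      | c :: rest => min (pvSAt sl i + pvS sl und N (pvChAt und i))
          (pvS sl und N (pvChAt und i) + pvDMin sl und N (pvD sl und N c) rest)) := by
  conv_lhs => rw [pvGoB]
  have hk : PySem.List.pyGetD und i [] = und.getD (pvNorm N i) [] := by
    rw [pvGetD_norm und i [] (hc.1 ▸ h0), hc.1]
  have hfold := PySem.List.foldl_congr_mem (PySem.List.pyGetD und i [])
    (fun (p : Int × Option Int) c =>
      let r := pvGoB sl und N c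
      let d := r.1 - r.2
      (p.1 + r.2, match p.2 with
        | none => some d
        | some fo => some (if d < fo then d else fo)))
    (fun (p : Int × Option Int) c =>
      let r := pvGoB sl und (N + 1) c
      let d := r.1 - r.2
      (p.1 + r.2, match p.2 with
        | none => some d
        | some fo => some (if d < fo then d else fo)))
    (0, (none : Option Int))
    (by
      intro acc c hcmem
      rw [hk] at hcmem
      obtain ⟨hir, hmem, hlt⟩ := hc.2.2 (pvNorm N i) h1 c hcmem
      have hrk : rk (pvNorm N c) < N := by have := hc.2.1 (pvNorm N i); omega
      simp only [goB_stable sl und N R rk hc N c hir hmem hrk])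
  rw [hfold]
  simp only [pvChAt, pvSAt, pvS, pvD, pvDMin, pvPart, pvBest]
  cases hcs : PySem.List.pyGetD und i [] with
  | nil => simp
  | cons c rest =>
    simp only [List.foldl_cons]
    rw [bFoldFst (pvGoB sl und (N + 1)), bFoldSnd (pvGoB sl und (N + 1))]
    simp

-- a left fold of min over shifted values equals min of start and shifted fold
lemma pvMinFoldShift (dfn : Int → Int) (K : Int) :
    ∀ (rest : List Int) (x p : Int),
      rest.foldl (fun r c => min (K + dfn c) r) (min (K + x) p)
        = min p (K + rest.foldl (fun f c => min (dfn c) f) x) := by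
  intro rest
  induction rest with
  | nil => intro x p; simp [min_comm]
  | cons c t IH =>
    intro x p
    simp only [List.foldl_cons]
    rw [← min_assoc, min_add_add_left]
    exact IH _ _

-- A's children_sum fold computes a running sum of best values and preserves the invariant
lemma aSumFold (sl : List Int) (und : List (List Int)) (N : Nat) (R : Finset Nat)
    (rk : Nat → Nat) (f : Nat)
    (H : ∀ (c : Int) (cache : List Int), PySem.Raise.InRange N c → pvNorm N c ∈ R →
      rk (pvNorm N c) < f → pvInv sl und N cache →
      (pvGetA sl und f cache c).1 = pvBest sl und N c ∧
        pvInv sl und N (pvGetA sl und f cache c).2) :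
    ∀ (cs : List Int) (s : Int) (cache : List Int),
      (∀ c ∈ cs, PySem.Raise.InRange N c ∧ pvNorm N c ∈ R ∧ rk (pvNorm N c) < f) →
      pvInv sl und N cache →
      (cs.foldl (fun (p : Int × List Int) c =>
          let r := pvGetA sl und f p.2 c
          (p.1 + r.1, r.2)) (s, cache)).1 = s + pvS sl und N cs ∧
      pvInv sl und N (cs.foldl (fun (p : Int × List Int) c =>
          let r := pvGetA sl und f p.2 c
          (p.1 + r.1, r.2)) (s, cache)).2 := by
  intro cs
  induction cs with
  | nil => intro s cache _ hinv; exact ⟨by simp [pvS], hinv⟩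
  | cons c rest IH =>
    intro s cache hcond hinv
    obtain ⟨hc0, hcn, hcf⟩ := hcond c (by simp)
    obtain ⟨hval, hinv'⟩ := H c cache hc0 hcn hcf hinv
    simp only [List.foldl_cons]
    obtain ⟨h1, h2⟩ := IH (s + (pvGetA sl und f cache c).1) (pvGetA sl und f cache c).2
      (fun x hx => hcond x (by simp [hx])) hinv'
    refine ⟨?_, h2⟩
    rw [h1, hval]
    simp [pvS, pvBest]
    ring

-- A's inner loop computes a running min of csum + (part c - best c)
lemma aMinFold (sl : List Int) (und : List (List Int)) (N : Nat) (R : Finset Nat)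
    (rk : Nat → Nat) (f : Nat) (K : Int) (hc : pvCtx und N R rk)
    (H : ∀ (c : Int) (cache : List Int), PySem.Raise.InRange N c → pvNorm N c ∈ R →
      rk (pvNorm N c) < f → pvInv sl und N cache →
      (pvGetA sl und f cache c).1 = pvBest sl und N c ∧
        pvInv sl und N (pvGetA sl und f cache c).2) :
    ∀ (cs : List Int) (r0 : Int) (cache : List Int),
      (∀ c ∈ cs, PySem.Raise.InRange N c ∧ pvNorm N c ∈ R ∧ rk (pvNorm N c) < f ∧
        ∀ g ∈ pvChAt und c, PySem.Raise.InRange N g ∧ pvNorm N g ∈ R ∧ rk (pvNorm N g) < f) →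
      pvInv sl und N cache →
      (cs.foldl (fun (p : Int × List Int) c =>
          let rc := pvGetA sl und f p.2 c
          let temp0 := K - rc.1 + PySem.List.pyGetD sl c 0
          let gcs := PySem.List.pyGetD und c []
          let q := gcs.foldl (fun (q : Int × List Int) g =>
              let rg := pvGetA sl und f q.2 g
              (q.1 + rg.1, rg.2)) (temp0, rc.2)
          (min q.1 p.1, q.2)) (r0, cache)).1
        = cs.foldl (fun r c => min (K + pvD sl und N c) r) r0 ∧
      pvInv sl und N (cs.foldl (fun (p : Int × List Int) c =>
          let rc := pvGetA sl und f p.2 c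
          let temp0 := K - rc.1 + PySem.List.pyGetD sl c 0
          let gcs := PySem.List.pyGetD und c []
          let q := gcs.foldl (fun (q : Int × List Int) g =>
              let rg := pvGetA sl und f q.2 g
              (q.1 + rg.1, rg.2)) (temp0, rc.2)
          (min q.1 p.1, q.2)) (r0, cache)).2 := by
  intro cs
  induction cs with
  | nil => intro r0 cache _ hinv; exact ⟨rfl, hinv⟩
  | cons c rest IH =>
    intro r0 cache hcond hinv
    obtain ⟨hc0, hcn, hcf, hgc⟩ := hcond c (by simp)
    obtain ⟨hval, hinv1⟩ := H c cache hc0 hcn hcf hinv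
    simp only [List.foldl_cons]
    have hsum := aSumFold sl und N R rk f H (PySem.List.pyGetD und c [])
      (K - (pvGetA sl und f cache c).1 + PySem.List.pyGetD sl c 0)
      (pvGetA sl und f cache c).2 (fun g hgm => hgc g hgm) hinv1
    obtain ⟨hq1, hq2⟩ := hsum
    obtain ⟨h1, h2⟩ := IH (min ((PySem.List.pyGetD und c []).foldl (fun (q : Int × List Int) g =>
        let rg := pvGetA sl und f q.2 g
        (q.1 + rg.1, rg.2))
        (K - (pvGetA sl und f cache c).1 + PySem.List.pyGetD sl c 0,
          (pvGetA sl und f cache c).2)).1 r0)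
      ((PySem.List.pyGetD und c []).foldl (fun (q : Int × List Int) g =>
        let rg := pvGetA sl und f q.2 g
        (q.1 + rg.1, rg.2))
        (K - (pvGetA sl und f cache c).1 + PySem.List.pyGetD sl c 0,
          (pvGetA sl und f cache c).2)).2
      (fun x hx => hcond x (by simp [hx])) hq2
    refine ⟨?_, h2⟩
    rw [h1]
    have hpart : (pvGoB sl und (N+1) c).1
        = PySem.List.pyGetD sl c 0 + pvS sl und N (PySem.List.pyGetD und c []) := by
      have := goB_char sl und N R rk hc c hc0 hcn
      have h' : pvChAt und c = PySem.List.pyGetD und c [] := rfl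
      rw [h'] at this
      exact congrArg Prod.fst this
    have hacc : min ((PySem.List.pyGetD und c []).foldl (fun (q : Int × List Int) g =>
        let rg := pvGetA sl und f q.2 g
        (q.1 + rg.1, rg.2))
        (K - (pvGetA sl und f cache c).1 + PySem.List.pyGetD sl c 0,
          (pvGetA sl und f cache c).2)).1 r0
        = min (K + pvD sl und N c) r0 := by
      rw [hq1, hval]
      congr 1
      simp only [pvD, pvPart, pvBest]
      rw [hpart]
      ring
    rw [hacc]

-- main: A's memoised recursion returns B's best value and preserves the cache invariant
lemma pvGetA_main (sl : List Int) (und : List (List Int)) (N : Nat) (R : Finset Nat)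
    (rk : Nat → Nat) (hc : pvCtx und N R rk) (hsl : sl.length = N) :
    ∀ (fuel : Nat) (i : Int) (cache : List Int), PySem.Raise.InRange N i →
      pvNorm N i ∈ R → rk (pvNorm N i) < fuel → pvInv sl und N cache →
      (pvGetA sl und fuel cache i).1 = pvBest sl und N i ∧
        pvInv sl und N (pvGetA sl und fuel cache i).2 := by
  intro fuel
  induction fuel with
  | zero => intro i cache h0 h1 hf hinv; omega
  | succ f IH =>
    intro i cache h0 h1 hf hinv
    have hcl : cache.length = N := hinv.1
    have hnl : pvNorm N i < N := pvNorm_lt N i h0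
    have hbesti : pvBest sl und N i = pvBest sl und N ((pvNorm N i : Nat) : Int) := by
      simp only [pvBest]
      rw [goB_normIdx sl und N hsl hc.1 N i h0]
    simp only [pvGetA]
    split_ifs with hcv hlen
    · -- cache hit
      have hget : PySem.List.pyGetD cache i (-1) = cache.getD (pvNorm N i) (-1) := by
        rw [pvGetD_norm cache i (-1) (hcl ▸ h0), hcl]
      rcases hinv.2 (pvNorm N i) hnl with hm | hm
      · exact absurd (by rw [hget, hm]) hcv
      · refine ⟨?_, hinv⟩
        rw [hget, hm, hbesti]
    · -- leaf: no underlings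
      have hknil : pvChAt und i = [] := by
        have : PySem.List.pyGetD und i [] = [] := List.length_eq_zero_iff.mp hlen
        exact this
      have hchar := goB_char sl und N R rk hc i h0 h1
      rw [hknil] at hchar
      exact ⟨by simp [pvBest, hchar], hinv⟩
    · -- interior node
      have hkid : PySem.List.pyGetD und i [] = und.getD (pvNorm N i) [] := by
        rw [pvGetD_norm und i [] (hc.1 ▸ h0), hc.1]
      have hcs : ∀ c ∈ PySem.List.pyGetD und i [],
          PySem.Raise.InRange N c ∧ pvNorm N c ∈ R ∧ rk (pvNorm N c) < f := by
        intro c hcm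
        rw [hkid] at hcm
        obtain ⟨hir, hmem, hlt⟩ := hc.2.2 (pvNorm N i) h1 c hcm
        exact ⟨hir, hmem, by omega⟩
      have hcs2 : ∀ c ∈ PySem.List.pyGetD und i [],
          PySem.Raise.InRange N c ∧ pvNorm N c ∈ R ∧ rk (pvNorm N c) < f ∧
          ∀ g ∈ pvChAt und c, PySem.Raise.InRange N g ∧ pvNorm N g ∈ R ∧ rk (pvNorm N g) < f := by
        intro c hcm
        obtain ⟨hc0, hcn, hcf⟩ := hcs c hcm
        refine ⟨hc0, hcn, hcf, fun g hg' => ?_⟩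
        have hkc : pvChAt und c = und.getD (pvNorm N c) [] := by
          simp only [pvChAt]
          rw [pvGetD_norm und c [] (hc.1 ▸ hc0), hc.1]
        rw [hkc] at hg'
        obtain ⟨hgir, hgm, hglt⟩ := hc.2.2 (pvNorm N c) hcn g hg'
        exact ⟨hgir, hgm, by omega⟩
      obtain ⟨hcsum, hinv1⟩ := aSumFold sl und N R rk f IH (PySem.List.pyGetD und i []) 0 cache hcs hinv
      obtain ⟨hm1, hinv2⟩ := aMinFold sl und N R rk f
        ((PySem.List.pyGetD und i []).foldl (fun (p : Int × List Int) c =>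
          let r := pvGetA sl und f p.2 c
          (p.1 + r.1, r.2)) (0, cache)).1 hc IH (PySem.List.pyGetD und i [])
        (PySem.List.pyGetD sl i 0 +
          ((PySem.List.pyGetD und i []).foldl (fun (p : Int × List Int) c =>
            let r := pvGetA sl und f p.2 c
            (p.1 + r.1, r.2)) (0, cache)).1)
        ((PySem.List.pyGetD und i []).foldl (fun (p : Int × List Int) c =>
          let r := pvGetA sl und f p.2 c
          (p.1 + r.1, r.2)) (0, cache)).2 hcs2 hinv1
      cases hcse : PySem.List.pyGetD und i [] with
      | nil => rw [hcse] at hlen; simp at hlen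
      | cons c0 rest =>
        rw [hcse] at hcsum hm1 hinv2
        have hchar := goB_char sl und N R rk hc i h0 h1
        have hch : pvChAt und i = c0 :: rest := hcse
        rw [hch] at hchar
        have hfst : ((c0 :: rest).foldl (fun (p : Int × List Int) c =>
            let rc := pvGetA sl und f p.2 c
            let temp0 := ((c0 :: rest).foldl (fun (p : Int × List Int) c =>
                let r := pvGetA sl und f p.2 c
                (p.1 + r.1, r.2)) (0, cache)).1 - rc.1 + PySem.List.pyGetD sl c 0
            let gcs := PySem.List.pyGetD und c []
            let q := gcs.foldl (fun (q : Int × List Int) g =>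
                let rg := pvGetA sl und f q.2 g
                (q.1 + rg.1, rg.2)) (temp0, rc.2)
            (min q.1 p.1, q.2))
            (PySem.List.pyGetD sl i 0 +
              ((c0 :: rest).foldl (fun (p : Int × List Int) c =>
                let r := pvGetA sl und f p.2 c
                (p.1 + r.1, r.2)) (0, cache)).1,
             ((c0 :: rest).foldl (fun (p : Int × List Int) c =>
                let r := pvGetA sl und f p.2 c
                (p.1 + r.1, r.2)) (0, cache)).2)).1 = pvBest sl und N i := by
          rw [hm1, List.foldl_cons, hcsum]
          rw [show ((0 : Int) + pvS sl und N (c0 :: rest) + pvD sl und N c0)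
              = (0 + pvS sl und N (c0 :: rest) + pvD sl und N c0) from rfl]
          rw [pvMinFoldShift]
          simp only [pvBest, hchar, zero_add]
          rfl
        refine ⟨hfst, ?_⟩
        have hl2 : _ = N := hinv2.1
        rw [pvSetD_norm _ i _ (hl2 ▸ h0), hl2]
        constructor
        · rw [List.length_set]; exact hl2
        · intro j hj
          rw [pvSet_getD _ _ _ _ _ (by rw [hl2]; exact hnl)]
          by_cases hji : j = pvNorm N i
          · right
            rw [if_pos hji, hfst, hji, ← hbesti]
          · rw [if_neg hji]
            exact hinv2.2 j hj

-- ===== VERDICT (by name: the statement is the Claim_ definition above) =====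
theorem solution_spec : Claim_equal_solution := by
  intro sales links hdom hpre
  obtain ⟨hne, hlk, hreach, hE⟩ := hpre
  have hpos : 0 < sales.length := List.length_pos_of_ne_nil hne
  set N := sales.length + 1 with hN
  show solution sales links = solution_alt sales links
  simp only [solution, solution_alt]
  have hlen : ((0 : Int) :: sales).length = N := by simp [hN]
  rw [hlen]
  set sl := (0 : Int) :: sales with hsl
  set und := pvBuild N links with hund
  set R := pvReach links N with hR
  set rk := fun u => N - pvDm links N u with hrk
  have hundlen : und.length = N := pvBuild_length N links
  have hundget : ∀ j : Nat, und.getD j [] = pvKidsOf links N j :=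
    pvBuild_getD links N (fun l hl => (hlk l hl).2)
  have hctx : pvCtx und N R rk := by
    refine ⟨hundlen, fun u => by simp [hrk], fun u hu c hcm => ?_⟩
    rw [hundget u] at hcm
    obtain ⟨hmem, hdm⟩ := pvEdge_step links N u c hE hu hcm
    have hir : PySem.Raise.InRange N c := hreach u hu c hcm
    refine ⟨hir, hmem, ?_⟩
    have hdc := pvDm_lt links N (pvNorm N c) hE hmem
    simp only [hrk]
    omega
  have h1R : (1 : Nat) ∈ R := by
    rw [hR, pvReach]
    refine Finset.mem_biUnion.2 ⟨0, Finset.mem_range.2 (by omega), ?_⟩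
    simp [pvLayer]
  have h1ir : PySem.Raise.InRange N (1 : Int) := ⟨by omega, by exact_mod_cast by omega⟩
  have h1n : pvNorm N (1 : Int) = 1 := by
    have : pvNorm N ((1 : Nat) : Int) = 1 := pvNorm_natCast N 1 (by omega)
    simpa using this
  have hinv0 : pvInv sl und N (List.replicate N (-1)) := by
    refine ⟨by simp, fun j hj => ?_⟩
    left
    rw [List.getD_replicate _ hj]
  obtain ⟨h1, _⟩ := pvGetA_main sl und N R rk hctx (by simp [hsl, hN]) (N + 1) 1
    (List.replicate N (-1)) h1ir (h1n ▸ h1R)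
    (by rw [h1n]; have := hctx.2.1 1; omega) hinv0
  exact h1
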